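-- pv_equiv track=rewrite | github.com/TheJDen/paris-hackathon-2026-inference | engine/runtime/cuda_graphs.py | _bucket_for
-- ===== SOURCE A (Python) =====
-- BUCKETS: list[int] = [1, 2, 4, 8, 16, 32, 64]
--
-- def _bucket_for(batch_size: int) -> int:
--     """Return the smallest bucket >= batch_size."""
--     for b in BUCKETS:
--         if b >= batch_size:
--             return b
--     raise ValueError(
--         f"batch_size={batch_size} exceeds max bucket {BUCKETS[-1]}. "
--         f"Add a larger bucket to BUCKETS."
--     )
-- ===== SOURCE B (Python) =====
-- BUCKETS: list[int] = [1, 2, 4, 8, 16, 32, 64]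
--
-- def _bucket_for(batch_size: int) -> int:
--     """Return the smallest bucket >= batch_size (closed-form bit trick)."""
--     target = 1 if batch_size <= 1 else 1 << (batch_size - 1).bit_length()
--     if target > BUCKETS[-1]:
--         raise ValueError(
--             f"batch_size={batch_size} exceeds max bucket {BUCKETS[-1]}. "
--             f"Add a larger bucket to BUCKETS."
--         )
--     return target
-- ===== Notes on version B (the rewrite author's own statement) =====
-- stated objective: simpler
-- what changed: Replaced the linear scan over BUCKETS with a closed-form power-of-two computation via bit_length, followed by a single bound check against the largest bucket.
import Mathlib
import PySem

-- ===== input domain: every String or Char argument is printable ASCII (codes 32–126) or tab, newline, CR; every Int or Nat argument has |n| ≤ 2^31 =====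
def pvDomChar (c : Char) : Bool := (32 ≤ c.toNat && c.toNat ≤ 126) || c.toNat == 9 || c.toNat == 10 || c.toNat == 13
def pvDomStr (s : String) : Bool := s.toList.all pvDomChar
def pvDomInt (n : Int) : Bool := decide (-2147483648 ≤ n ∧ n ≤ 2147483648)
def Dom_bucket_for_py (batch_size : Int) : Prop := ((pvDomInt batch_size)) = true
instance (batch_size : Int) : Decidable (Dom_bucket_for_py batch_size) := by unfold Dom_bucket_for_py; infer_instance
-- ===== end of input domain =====

-- B replaces A's linear scan over BUCKETS with a closed-form bit trick (objective: simpler).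

-- ===== PORT A =====
def pvBUCKETS : List Int := [1, 2, 4, 8, 16, 32, 64]

-- the for-loop of A: return the first bucket ≥ batch_size; the raise branch is outside Pre_ (result 0 is never claimed)
def bucketLoop : List Int → Int → Int
  | [], _ => 0
  | b :: rest, bs => if b ≥ bs then b else bucketLoop rest bs

def bucket_for_py (batch_size : Int) : Int := bucketLoop pvBUCKETS batch_size

-- ===== PORT B =====
-- (batch_size - 1).bit_length(), transliterated for naturals
def pvBitLen (n : Nat) : Nat :=
  if n = 0 then 0 else pvBitLen (n / 2) + 1

def bucket_for_py_alt (batch_size : Int) : Int :=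
  let target : Int := if batch_size ≤ 1 then 1 else 2 ^ pvBitLen (batch_size - 1).toNat
  if target > 64 then 0    -- the raise branch, outside Pre_
  else target

-- ===== PRECONDITION & SPEC =====
-- Pre_ excludes exactly the inputs where A (and B) raise ValueError: batch_size > 64.
def Pre_bucket_for_py (batch_size : Int) : Prop := batch_size ≤ 64
instance (batch_size : Int) : Decidable (Pre_bucket_for_py batch_size) := by unfold Pre_bucket_for_py; infer_instance
def pvWitness_bucket_for_py : Int := 37

def Spec_bucket_for_py (batch_size : Int) (out : Int) : Prop := out = bucket_for_py_alt batch_size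
instance (batch_size : Int) (out : Int) : Decidable (Spec_bucket_for_py batch_size out) := by unfold Spec_bucket_for_py; infer_instance

-- ===== CLAIM (what is proved, stated in full; the proofs are below) =====
def Claim_equal_bucket_for_py : Prop := ∀ (batch_size : Int), Dom_bucket_for_py batch_size → Pre_bucket_for_py batch_size → Spec_bucket_for_py batch_size (bucket_for_py batch_size)

-- ===== LEMMAS AND PROOFS =====

-- ===== VERDICT (by name: the statement is the Claim_ definition above) =====
set_option maxRecDepth 4000 in
theorem bucket_for_py_spec : Claim_equal_bucket_for_py := by
  intro bs _ hpre
  unfold Spec_bucket_for_py Pre_bucket_for_py at *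
  by_cases h1 : bs ≤ 1
  · simp [bucket_for_py, bucket_for_py_alt, bucketLoop, pvBUCKETS, h1]
  · have h2 : (2 : Int) ≤ bs := by omega
    interval_cases bs <;>
      simp [bucket_for_py, bucket_for_py_alt, bucketLoop, pvBUCKETS, pvBitLen]
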